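-- pv_equiv track=rewrite | github.com/AdityaSinghDevs/Reddit-Persona | formatter.py | format_persona_output
-- ===== SOURCE A (Python) =====
-- def format_persona_output(raw_text:str)-> str:
--     '''
--     Cleans and formats raw persona output from the LLM
--     Removes any duplicacy, extra spaces, and normalize section breaks
--
--     Args:
--         raw_text (str) : Raw persona text from the LLM.
--
--     Returns:
--         (str) : Formatted persona text
--
--     '''
--
--     lines = raw_text.strip().splitlines()
--     seen = set()
--     formatted_lines = []
--
--     for line in lines:
--         clean_line = line.strip()
--
--         #avoiding blank line stacking
--         if clean_line == "" and (not formatted_lines or formatted_lines[-1]==""):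
--             continue
--
--         #Remove exact duplicate lines (except blank ones)
--         if clean_line and clean_line not in seen:
--             formatted_lines.append(clean_line)
--             seen.add(clean_line)
--         elif clean_line == "":
--             formatted_lines.append("")
--
--     return "\n".join(formatted_lines).strip()
-- ===== SOURCE B (Python) =====
-- def format_persona_output(raw_text: str) -> str:
--     '''Two sequential passes: dedup non-blank lines first, then collapse blank runs.'''
--     stripped = [line.strip() for line in raw_text.strip().splitlines()]
--
--     # Pass 1: drop repeated non-blank lines, keep every blank line in place.
--     seen = set()
--     deduped = []
--     for line in stripped:
--         if line == "":
--             deduped.append(line)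
--         elif line not in seen:
--             deduped.append(line)
--             seen.add(line)
--
--     # Pass 2: collapse each run of consecutive blank lines to a single blank.
--     collapsed = []
--     prev_blank = False
--     for line in deduped:
--         if line == "":
--             if not prev_blank:
--                 collapsed.append(line)
--             prev_blank = True
--         else:
--             collapsed.append(line)
--             prev_blank = False
--
--     return "\n".join(collapsed).strip()
-- ===== Notes on version B (the rewrite author's own statement) =====
-- stated objective: simpler
-- what changed: A's single fused loop that simultaneously dedups non-blank lines and suppresses blank-line stacking is split into two sequential passes: pass 1 dedups non-blank lines keeping every blank in place, pass 2 collapses runs of consecutive blanks to one, with the final strip removing a possible leading blank.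
import Mathlib
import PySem

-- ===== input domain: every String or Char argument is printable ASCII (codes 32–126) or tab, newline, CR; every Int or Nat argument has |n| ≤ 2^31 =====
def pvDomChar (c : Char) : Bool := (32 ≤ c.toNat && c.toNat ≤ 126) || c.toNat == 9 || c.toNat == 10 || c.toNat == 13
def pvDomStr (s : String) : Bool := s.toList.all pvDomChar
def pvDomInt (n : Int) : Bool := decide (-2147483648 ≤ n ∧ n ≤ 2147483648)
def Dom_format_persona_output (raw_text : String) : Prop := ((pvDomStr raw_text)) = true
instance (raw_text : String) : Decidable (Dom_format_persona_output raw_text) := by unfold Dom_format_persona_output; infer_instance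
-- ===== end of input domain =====

-- B splits A's fused one-pass dedup+blank-collapse loop into two sequential passes (dedup, then
-- collapse blank runs); objective: simpler decomposition, same O(n) cost.

-- ===== PORT A =====
-- A's loop body (one iteration of the 'for line in lines' loop).
def pvAStep (st : List String × PySem.Set String) (line : String) : List String × PySem.Set String :=
  let clean := PySem.Str.strip line
  if clean = "" ∧ (st.1 = [] ∨ st.1.getLast? = some "") then st
  else if clean ≠ "" ∧ st.2.contains clean = false then (st.1 ++ [clean], st.2.add clean)
  else if clean = "" then (st.1 ++ [""], st.2)
  else st

def format_persona_output (raw_text : String) : String :=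
  let lines := PySem.Str.splitlines (PySem.Str.strip raw_text)
  let st := lines.foldl pvAStep ([], PySem.Set.empty)
  PySem.Str.strip (PySem.Str.join "\n" st.1)

-- ===== PORT B =====
-- Pass 1 of Source B (loop body): drop repeated non-blank lines, keep every blank line in place.
def pvDedStep (st : List String × PySem.Set String) (line : String) : List String × PySem.Set String :=
  if line = "" then (st.1 ++ [line], st.2)
  else if st.2.contains line = false then (st.1 ++ [line], st.2.add line)
  else st

-- Pass 2 of Source B (loop body): collapse each run of consecutive blank lines to a single blank.
def pvColStep (st : List String × Bool) (line : String) : List String × Bool :=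
  if line = "" then (if st.2 then st else (st.1 ++ [line], true))
  else (st.1 ++ [line], false)

def format_persona_output_alt (raw_text : String) : String :=
  let stripped := (PySem.Str.splitlines (PySem.Str.strip raw_text)).map PySem.Str.strip
  let deduped := (stripped.foldl pvDedStep ([], PySem.Set.empty)).1
  let collapsed := (deduped.foldl pvColStep ([], false)).1
  PySem.Str.strip (PySem.Str.join "\n" collapsed)

-- ===== PRECONDITION & SPEC =====
def Spec_format_persona_output (raw_text : String) (out : String) : Prop := out = format_persona_output_alt raw_text
instance (raw_text : String) (out : String) : Decidable (Spec_format_persona_output raw_text out) := by unfold Spec_format_persona_output; infer_instance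

-- ===== CLAIM (what is proved, stated in full; the proofs are below) =====
def Claim_equal_format_persona_output : Prop := ∀ (raw_text : String), Dom_format_persona_output raw_text → Spec_format_persona_output raw_text (format_persona_output raw_text)

-- ===== LEMMAS AND PROOFS =====

-- Direct-recursion form of A's loop: seen set plus a flag "output is empty or ends with a blank".
def pvARun (seen : PySem.Set String) (flag : Bool) : List String → List String
  | [] => []
  | l :: ls =>
    let c := PySem.Str.strip l
    if c = "" then (if flag then pvARun seen true ls else "" :: pvARun seen true ls)
    else if seen.contains c then pvARun seen flag ls
    else c :: pvARun (seen.add c) false ls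

-- Direct-recursion forms of B's two passes.
def pvBDed (seen : PySem.Set String) : List String → List String
  | [] => []
  | l :: ls =>
    if l = "" then l :: pvBDed seen ls
    else if seen.contains l then pvBDed seen ls
    else l :: pvBDed (seen.add l) ls

def pvBCol (flag : Bool) : List String → List String
  | [] => []
  | l :: ls =>
    if l = "" then (if flag then pvBCol true ls else l :: pvBCol true ls)
    else l :: pvBCol false ls

lemma pvAFold_shape (ls : List String) : ∀ (acc : List String) (seen : PySem.Set String),
    (ls.foldl pvAStep (acc, seen)).1
      = acc ++ pvARun seen (decide (acc = [] ∨ acc.getLast? = some "")) ls := by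
  induction ls with
  | nil => intro acc seen; simp [pvARun]
  | cons l ls ih =>
    intro acc seen
    by_cases hc : PySem.Str.strip l = ""
    · by_cases hf : acc = [] ∨ acc.getLast? = some ""
      · have h1 : pvAStep (acc, seen) l = (acc, seen) := by simp [pvAStep, hc, hf]
        rw [List.foldl_cons, h1, ih]
        simp [pvARun, hc, hf]
      · have h1 : pvAStep (acc, seen) l = (acc ++ [""], seen) := by simp [pvAStep, hc, hf]
        rw [List.foldl_cons, h1, ih]
        simp [pvARun, hc, hf]
    · by_cases hs : seen.contains (PySem.Str.strip l) = false
      · have hmem : PySem.Str.strip l ∉ seen := by simpa using hs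
        have h1 : pvAStep (acc, seen) l
            = (acc ++ [PySem.Str.strip l], seen.add (PySem.Str.strip l)) := by
          simp [pvAStep, hc, hmem]
        rw [List.foldl_cons, h1, ih]
        simp [pvARun, hc, hmem]
      · have hmem : PySem.Str.strip l ∈ seen := by
          by_contra hm
          exact hs (by simpa using hm)
        have h1 : pvAStep (acc, seen) l = (acc, seen) := by simp [pvAStep, hc, hmem]
        rw [List.foldl_cons, h1, ih]
        simp [pvARun, hc, hmem]

lemma pvDedFold_shape (ls : List String) : ∀ (acc : List String) (seen : PySem.Set String),
    (ls.foldl pvDedStep (acc, seen)).1 = acc ++ pvBDed seen ls := by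
  induction ls with
  | nil => intro acc seen; simp [pvBDed]
  | cons l ls ih =>
    intro acc seen
    by_cases hc : l = ""
    · have h1 : pvDedStep (acc, seen) l = (acc ++ [l], seen) := by simp [pvDedStep, hc]
      rw [List.foldl_cons, h1, ih]
      simp [pvBDed, hc]
    · by_cases hs : seen.contains l = false
      · have hmem : l ∉ seen := by simpa using hs
        have h1 : pvDedStep (acc, seen) l = (acc ++ [l], seen.add l) := by
          simp [pvDedStep, hc, hmem]
        rw [List.foldl_cons, h1, ih]
        simp [pvBDed, hc, hmem]
      · have hmem : l ∈ seen := by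
          by_contra hm
          exact hs (by simpa using hm)
        have h1 : pvDedStep (acc, seen) l = (acc, seen) := by simp [pvDedStep, hc, hmem]
        rw [List.foldl_cons, h1, ih]
        simp [pvBDed, hc, hmem]

lemma pvColFold_shape (ls : List String) : ∀ (acc : List String) (flag : Bool),
    (ls.foldl pvColStep (acc, flag)).1 = acc ++ pvBCol flag ls := by
  induction ls with
  | nil => intro acc flag; simp [pvBCol]
  | cons l ls ih =>
    intro acc flag
    by_cases hc : l = ""
    · cases flag with
      | true =>
        have h1 : pvColStep (acc, true) l = (acc, true) := by simp [pvColStep, hc]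
        rw [List.foldl_cons, h1, ih]
        simp [pvBCol, hc]
      | false =>
        have h1 : pvColStep (acc, false) l = (acc ++ [l], true) := by simp [pvColStep, hc]
        rw [List.foldl_cons, h1, ih]
        simp [pvBCol, hc]
    · have h1 : pvColStep (acc, flag) l = (acc ++ [l], false) := by simp [pvColStep, hc]
      rw [List.foldl_cons, h1, ih]
      simp [pvBCol, hc]

-- Fusing B's two passes yields A's single pass.
lemma pvFuse (ls : List String) : ∀ (seen : PySem.Set String) (flag : Bool),
    pvARun seen flag ls = pvBCol flag (pvBDed seen (ls.map PySem.Str.strip)) := by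
  induction ls with
  | nil => intro seen flag; simp [pvARun, pvBDed, pvBCol]
  | cons l ls ih =>
    intro seen flag
    simp only [List.map_cons]
    by_cases hc : PySem.Str.strip l = ""
    · cases flag <;> simp [pvARun, pvBDed, pvBCol, hc, ih]
    · by_cases hs : seen.contains (PySem.Str.strip l) = true
      · have hmem : PySem.Str.strip l ∈ seen := by simpa using hs
        simp [pvARun, pvBDed, hc, hmem, ih]
      · have hmem : PySem.Str.strip l ∉ seen := by simpa using hs
        simp [pvARun, pvBDed, pvBCol, hc, hmem, ih]

lemma pvCol_false_true (ls : List String) :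
    pvBCol false ls = pvBCol true ls ∨ pvBCol false ls = "" :: pvBCol true ls := by
  cases ls with
  | nil => left; rfl
  | cons l ls =>
    by_cases hc : l = ""
    · right; simp [pvBCol, hc]
    · left; simp [pvBCol, hc]

lemma pvStrip_join_blank_cons (xs : List String) :
    PySem.Str.strip (PySem.Str.join "\n" ("" :: xs)) = PySem.Str.strip (PySem.Str.join "\n" xs) := by
  cases xs with
  | nil => rfl
  | cons y ys =>
    have h : (PySem.Str.strip (PySem.Str.join "\n" ("" :: y :: ys))).toList
        = (PySem.Str.strip (PySem.Str.join "\n" (y :: ys))).toList := by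
      simp only [PySem.Str.toList_strip, PySem.Str.toList_join, List.map_cons]
      rw [PySem.Chars.join_cons_cons]
      have he : ("".toList : List Char) = [] := rfl
      have hn : ("\n".toList : List Char) = ['\n'] := rfl
      rw [he, hn, List.nil_append]
      show PySem.Chars.strip ('\n' :: PySem.Chars.join "\n".toList (y.toList :: ys.map String.toList)) = _
      simp only [PySem.Chars.strip, PySem.Chars.lstrip]
      rw [List.dropWhile_cons_of_pos (by decide)]
      rw [hn]
    exact String.ext (by simpa [String.toList] using h)

-- ===== VERDICT (by name: the statement is the Claim_ definition above) =====
theorem format_persona_output_spec : Claim_equal_format_persona_output := by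
  intro raw_text _
  show format_persona_output raw_text = format_persona_output_alt raw_text
  simp only [format_persona_output, format_persona_output_alt]
  rw [pvAFold_shape, pvDedFold_shape, pvColFold_shape, pvFuse]
  rw [show (decide (([] : List String) = [] ∨ ([] : List String).getLast? = some "")) = true
      from by decide]
  rw [List.nil_append, List.nil_append, List.nil_append]
  rcases pvCol_false_true (pvBDed PySem.Set.empty
      ((PySem.Str.splitlines (PySem.Str.strip raw_text)).map PySem.Str.strip)) with h | h
  · rw [h]
  · rw [h, pvStrip_join_blank_cons]
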